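-- pv_equiv track=rewrite | github.com/DragonShadows1978/AI-AtlasForge | interactive_graph.py | extract_subgraph
-- ===== SOURCE A (Python) =====
-- from typing import Dict, List, Optional, Tuple, Set, Any
--
-- def extract_subgraph(
--     nodes: List[Dict],
--     edges: List[Dict],
--     center_node_id: str,
--     depth: int = 1
-- ) -> Tuple[List[Dict], List[Dict]]:
--     """
--     Extract a subgraph centered on a specific node.
--
--     Returns all nodes connected to the center node (directly or up to `depth` hops)
--     and all edges between them.
--
--     Args:
--         nodes: All nodes in the graph
--         edges: All edges in the graph
--         center_node_id: The node to center the subgraph on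
--         depth: How many hops away to include (1 = immediate neighbors only)
--
--     Returns:
--         Tuple of (filtered_nodes, filtered_edges)
--     """
--     if depth < 1:
--         depth = 1
--
--     # Build adjacency maps
--     outgoing = {}  # node_id -> list of connected node_ids
--     incoming = {}  # node_id -> list of connected node_ids
--
--     for edge in edges:
--         source = edge.get('source')
--         target = edge.get('target')
--
--         if source:
--             if source not in outgoing:
--                 outgoing[source] = []
--             outgoing[source].append(target)
--
--         if target:
--             if target not in incoming:
--                 incoming[target] = []
--             incoming[target].append(source)
--
--     # BFS to find all nodes within depth
--     included_nodes = {center_node_id}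
--     frontier = {center_node_id}
--
--     for _ in range(depth):
--         next_frontier = set()
--         for node_id in frontier:
--             # Add all connected nodes
--             for neighbor in outgoing.get(node_id, []):
--                 if neighbor not in included_nodes:
--                     next_frontier.add(neighbor)
--                     included_nodes.add(neighbor)
--             for neighbor in incoming.get(node_id, []):
--                 if neighbor not in included_nodes:
--                     next_frontier.add(neighbor)
--                     included_nodes.add(neighbor)
--         frontier = next_frontier
--         if not frontier:
--             break
--
--     # Filter nodes
--     filtered_nodes = [n for n in nodes if n.get('id') in included_nodes]
--
--     # Filter edges - only include edges where both endpoints are in the subgraph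
--     filtered_edges = [
--         e for e in edges
--         if e.get('source') in included_nodes and e.get('target') in included_nodes
--     ]
--
--     return filtered_nodes, filtered_edges
-- ===== SOURCE B (Python) =====
-- from typing import Dict, List, Optional, Tuple, Set, Any
--
-- def extract_subgraph(
--     nodes: List[Dict],
--     edges: List[Dict],
--     center_node_id: str,
--     depth: int = 1
-- ) -> Tuple[List[Dict], List[Dict]]:
--     """Edge-relaxation variant: no adjacency maps; each round scans the edge
--     list once and grows the included set, stopping at the fixpoint or after
--     `depth` rounds (clamped to at least 1)."""
--     rounds = max(depth, 1)
--     included = {center_node_id}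
--     for _ in range(rounds):
--         grown = set(included)
--         for e in edges:
--             s = e.get('source')
--             t = e.get('target')
--             if s and s in included:
--                 grown.add(t)
--             if t and t in included:
--                 grown.add(s)
--         if len(grown) == len(included):
--             break
--         included = grown
--     filtered_nodes = [n for n in nodes if n.get('id') in included]
--     filtered_edges = [
--         e for e in edges
--         if e.get('source') in included and e.get('target') in included
--     ]
--     return filtered_nodes, filtered_edges
-- ===== Notes on version B (the rewrite author's own statement) =====
-- stated objective: alternative
-- what changed: Replaced A's two directed adjacency dicts plus level-frontier BFS with a frontier-free semi-naive fixpoint: each round rescans the raw edge list once, growing the included set from the previous round's set, stopping when the set stops growing or after depth rounds.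
import Mathlib
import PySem

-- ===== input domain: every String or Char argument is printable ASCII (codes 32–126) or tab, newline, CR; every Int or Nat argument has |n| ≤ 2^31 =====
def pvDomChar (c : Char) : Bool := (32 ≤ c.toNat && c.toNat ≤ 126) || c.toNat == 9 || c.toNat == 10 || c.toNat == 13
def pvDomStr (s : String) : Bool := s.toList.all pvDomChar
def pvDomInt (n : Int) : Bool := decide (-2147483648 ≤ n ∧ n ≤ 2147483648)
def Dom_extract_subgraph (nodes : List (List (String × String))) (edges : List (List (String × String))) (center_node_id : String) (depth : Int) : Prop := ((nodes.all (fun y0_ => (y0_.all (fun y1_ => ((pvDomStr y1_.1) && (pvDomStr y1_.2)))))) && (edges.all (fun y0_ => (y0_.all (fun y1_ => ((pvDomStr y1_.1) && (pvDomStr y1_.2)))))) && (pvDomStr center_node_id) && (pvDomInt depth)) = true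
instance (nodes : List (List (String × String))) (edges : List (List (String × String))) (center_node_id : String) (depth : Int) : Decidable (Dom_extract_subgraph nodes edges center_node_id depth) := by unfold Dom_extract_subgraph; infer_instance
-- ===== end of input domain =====

-- B replaces A's two adjacency dicts + level-frontier BFS by a per-round scan of the
-- raw edge list growing the included set to a fixpoint (no adjacency structure, no frontier);
-- objective: alternative (a genuinely different traversal of the same graph).


-- shared tiny primitives: edge.get('k') on an input dict (first match), and Python truthiness of the result
def pvGet (d : List (String × String)) (k : String) : Option String :=
  (PySem.Dict.mk d).get? k

def pvTruthy (o : Option String) : Bool :=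
  match o with
  | none => false
  | some s => !(s == "")

-- ===== PORT A =====
-- the two adjacency-map building loops ('if source: outgoing[source] gets [] then append target')
def pvBuildOut (edges : List (List (String × String))) : PySem.Dict String (List (Option String)) :=
  edges.foldl (fun d e =>
    match pvGet e "source" with
    | some s => if s == "" then d else d.modify s [] (· ++ [pvGet e "target"])
    | none => d) PySem.Dict.empty

def pvBuildIn (edges : List (List (String × String))) : PySem.Dict String (List (Option String)) :=
  edges.foldl (fun d e =>
    match pvGet e "target" with
    | some t => if t == "" then d else d.modify t [] (· ++ [pvGet e "source"])
    | none => d) PySem.Dict.empty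

-- outgoing.get(node_id, []) — a frontier element may be None (a neighbour value); strings are the keys
def pvLookup (d : PySem.Dict String (List (Option String))) (u : Option String) : List (Option String) :=
  match u with
  | some s => d.getD s []
  | none => []

-- one frontier element: its outgoing then incoming neighbours,
-- 'if neighbor not in included_nodes: next_frontier.add(..); included_nodes.add(..)'
def pvRoundA (outg inc : PySem.Dict String (List (Option String)))
    (st : PySem.Set (Option String) × PySem.Set (Option String)) (u : Option String) :
    PySem.Set (Option String) × PySem.Set (Option String) :=
  let st1 := (pvLookup outg u).foldl
    (fun st nb => if PySem.Set.contains st.2 nb then st else (PySem.Set.add st.1 nb, PySem.Set.add st.2 nb)) st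
  (pvLookup inc u).foldl
    (fun st nb => if PySem.Set.contains st.2 nb then st else (PySem.Set.add st.1 nb, PySem.Set.add st.2 nb)) st1

-- 'for _ in range(depth): … frontier = next_frontier; if not frontier: break'
def pvBfsA (outg inc : PySem.Dict String (List (Option String))) :
    Nat → PySem.Set (Option String) → PySem.Set (Option String) → PySem.Set (Option String)
  | 0, included, _ => included
  | k+1, included, frontier =>
      let st := frontier.foldl (pvRoundA outg inc) (PySem.Set.empty, included)
      if st.1.isEmpty then st.2 else pvBfsA outg inc k st.2 st.1

def extract_subgraph (nodes : List (List (String × String))) (edges : List (List (String × String))) (center_node_id : String) (depth : Int) : (List (List (String × String))) × (List (List (String × String))) :=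
  let depth' := if depth < 1 then 1 else depth
  let outgoing := pvBuildOut edges
  let incoming := pvBuildIn edges
  let included := pvBfsA outgoing incoming depth'.toNat
      (PySem.Set.ofList [some center_node_id]) (PySem.Set.ofList [some center_node_id])
  let filtered_nodes := nodes.filter (fun n => PySem.Set.contains included (pvGet n "id"))
  let filtered_edges := edges.filter (fun e =>
    PySem.Set.contains included (pvGet e "source") && PySem.Set.contains included (pvGet e "target"))
  (filtered_nodes, filtered_edges)

-- ===== PORT B =====
-- one relaxation round: scan the edge list once, growing from the frozen `included`
def pvGrowB (included : PySem.Set (Option String)) (edges : List (List (String × String))) :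
    PySem.Set (Option String) :=
  edges.foldl (fun grown e =>
    let s := pvGet e "source"
    let t := pvGet e "target"
    let grown := if pvTruthy s && PySem.Set.contains included s then PySem.Set.add grown t else grown
    if pvTruthy t && PySem.Set.contains included t then PySem.Set.add grown s else grown) included

-- 'for _ in range(rounds): grown = …; if len(grown) == len(included): break; included = grown'
def pvSatB (edges : List (List (String × String))) :
    Nat → PySem.Set (Option String) → PySem.Set (Option String)
  | 0, included => included
  | k+1, included =>
      let grown := pvGrowB included edges
      if grown.length = included.length then included else pvSatB edges k grown

def extract_subgraph_alt (nodes : List (List (String × String))) (edges : List (List (String × String))) (center_node_id : String) (depth : Int) : (List (List (String × String))) × (List (List (String × String))) :=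
  let rounds := max depth 1
  let included := pvSatB edges rounds.toNat (PySem.Set.ofList [some center_node_id])
  let filtered_nodes := nodes.filter (fun n => PySem.Set.contains included (pvGet n "id"))
  let filtered_edges := edges.filter (fun e =>
    PySem.Set.contains included (pvGet e "source") && PySem.Set.contains included (pvGet e "target"))
  (filtered_nodes, filtered_edges)

-- ===== PRECONDITION & SPEC =====
def Spec_extract_subgraph (nodes : List (List (String × String))) (edges : List (List (String × String))) (center_node_id : String) (depth : Int) (out : (List (List (String × String))) × (List (List (String × String)))) : Prop := out = extract_subgraph_alt nodes edges center_node_id depth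
instance (nodes : List (List (String × String))) (edges : List (List (String × String))) (center_node_id : String) (depth : Int) (out : (List (List (String × String))) × (List (List (String × String)))) : Decidable (Spec_extract_subgraph nodes edges center_node_id depth out) := by unfold Spec_extract_subgraph; infer_instance

-- ===== CLAIM (what is proved, stated in full; the proofs are below) =====
def Claim_equal_extract_subgraph : Prop := ∀ (nodes : List (List (String × String))) (edges : List (List (String × String))) (center_node_id : String) (depth : Int), Dom_extract_subgraph nodes edges center_node_id depth → Spec_extract_subgraph nodes edges center_node_id depth (extract_subgraph nodes edges center_node_id depth)

-- ===== LEMMAS AND PROOFS =====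

-- the guarded undirected neighbour relation both programs explore
def pvNbr (edges : List (List (String × String))) (u x : Option String) : Prop :=
  ∃ e ∈ edges,
    (pvGet e "source" = u ∧ pvTruthy u = true ∧ pvGet e "target" = x) ∨
    (pvGet e "target" = u ∧ pvTruthy u = true ∧ pvGet e "source" = x)

theorem pvBuildOut_aux (edges : List (List (String × String)))
    (d : PySem.Dict String (List (Option String))) (s : String) (x : Option String) :
    x ∈ (edges.foldl (fun d e =>
      match pvGet e "source" with
      | some s' => if s' == "" then d else d.modify s' [] (· ++ [pvGet e "target"])
      | none => d) d).getD s []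
    ↔ x ∈ d.getD s [] ∨ ∃ e ∈ edges, pvGet e "source" = some s ∧ ¬ s = "" ∧ pvGet e "target" = x := by
  induction edges generalizing d with
  | nil => simp
  | cons e es ih =>
    simp only [List.foldl_cons]
    cases hsrc : pvGet e "source" with
    | none =>
      simp only [hsrc]
      rw [ih]
      simp only [List.mem_cons]
      constructor
      · rintro (h | ⟨e', he', hp⟩)
        · exact Or.inl h
        · exact Or.inr ⟨e', Or.inr he', hp⟩
      · rintro (h | ⟨e', he' | he', hp⟩)
        · exact Or.inl h
        · subst he'; rw [hsrc] at hp; simp at hp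
        · exact Or.inr ⟨e', he', hp⟩
    | some s' =>
      simp only [hsrc]
      by_cases hs' : s' = ""
      · rw [if_pos (by simpa using hs')]
        rw [ih]
        simp only [List.mem_cons]
        constructor
        · rintro (h | ⟨e', he', hp⟩)
          · exact Or.inl h
          · exact Or.inr ⟨e', Or.inr he', hp⟩
        · rintro (h | ⟨e', he' | he', hp⟩)
          · exact Or.inl h
          · subst he'; obtain ⟨h1, h2, h3⟩ := hp
            rw [hsrc] at h1; injection h1 with h1; exact absurd (h1 ▸ hs') h2
          · exact Or.inr ⟨e', he', hp⟩
      · rw [if_neg (by simpa using hs')]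
        rw [ih, PySem.Dict.getD_modify]
        simp only [List.mem_cons]
        by_cases hss : s = s'
        · subst hss
          rw [if_pos rfl]
          simp only [List.mem_append, List.mem_singleton]
          constructor
          · rintro (⟨h | h⟩ | ⟨e', he', hp⟩)
            · exact Or.inl h
            · exact Or.inr ⟨e, Or.inl rfl, hsrc, hs', h.symm⟩
            · exact Or.inr ⟨e', Or.inr he', hp⟩
          · rintro (h | ⟨e', he' | he', hp⟩)
            · exact Or.inl (Or.inl h)
            · subst he'; obtain ⟨h1, h2, h3⟩ := hp; exact Or.inl (Or.inr h3.symm)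
            · exact Or.inr ⟨e', he', hp⟩
        · rw [if_neg hss]
          constructor
          · rintro (h | ⟨e', he', hp⟩)
            · exact Or.inl h
            · exact Or.inr ⟨e', Or.inr he', hp⟩
          · rintro (h | ⟨e', he' | he', hp⟩)
            · exact Or.inl h
            · subst he'; obtain ⟨h1, h2, h3⟩ := hp
              rw [hsrc] at h1; cases h1; exact absurd rfl hss
            · exact Or.inr ⟨e', he', hp⟩

theorem pvLookup_out_mem (edges : List (List (String × String))) (u x : Option String) :
    x ∈ pvLookup (pvBuildOut edges) u ↔
      ∃ e ∈ edges, pvGet e "source" = u ∧ pvTruthy u = true ∧ pvGet e "target" = x := by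
  cases u with
  | none => simp [pvLookup, pvTruthy]
  | some s =>
    show x ∈ (pvBuildOut edges).getD s [] ↔ _
    rw [pvBuildOut, pvBuildOut_aux]
    simp [pvTruthy, PySem.Dict.getD_empty]

theorem pvBuildIn_aux (edges : List (List (String × String)))
    (d : PySem.Dict String (List (Option String))) (s : String) (x : Option String) :
    x ∈ (edges.foldl (fun d e =>
      match pvGet e "target" with
      | some s' => if s' == "" then d else d.modify s' [] (· ++ [pvGet e "source"])
      | none => d) d).getD s []
    ↔ x ∈ d.getD s [] ∨ ∃ e ∈ edges, pvGet e "target" = some s ∧ ¬ s = "" ∧ pvGet e "source" = x := by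
  induction edges generalizing d with
  | nil => simp
  | cons e es ih =>
    simp only [List.foldl_cons]
    cases hsrc : pvGet e "target" with
    | none =>
      simp only [hsrc]
      rw [ih]
      simp only [List.mem_cons]
      constructor
      · rintro (h | ⟨e', he', hp⟩)
        · exact Or.inl h
        · exact Or.inr ⟨e', Or.inr he', hp⟩
      · rintro (h | ⟨e', he' | he', hp⟩)
        · exact Or.inl h
        · subst he'; rw [hsrc] at hp; simp at hp
        · exact Or.inr ⟨e', he', hp⟩
    | some s' =>
      simp only [hsrc]
      by_cases hs' : s' = ""
      · rw [if_pos (by simpa using hs')]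
        rw [ih]
        simp only [List.mem_cons]
        constructor
        · rintro (h | ⟨e', he', hp⟩)
          · exact Or.inl h
          · exact Or.inr ⟨e', Or.inr he', hp⟩
        · rintro (h | ⟨e', he' | he', hp⟩)
          · exact Or.inl h
          · subst he'; rw [hsrc] at hp; obtain ⟨h1, h2, h3⟩ := hp
            injection h1 with h1; exact absurd (h1 ▸ hs') h2
          · exact Or.inr ⟨e', he', hp⟩
      · rw [if_neg (by simpa using hs')]
        rw [ih, PySem.Dict.getD_modify]
        simp only [List.mem_cons]
        by_cases hss : s = s'
        · subst hss
          rw [if_pos rfl]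
          simp only [List.mem_append, List.mem_singleton]
          constructor
          · rintro (⟨h | h⟩ | ⟨e', he', hp⟩)
            · exact Or.inl h
            · exact Or.inr ⟨e, Or.inl rfl, hsrc, hs', h.symm⟩
            · exact Or.inr ⟨e', Or.inr he', hp⟩
          · rintro (h | ⟨e', he' | he', hp⟩)
            · exact Or.inl (Or.inl h)
            · subst he'; obtain ⟨h1, h2, h3⟩ := hp; exact Or.inl (Or.inr h3.symm)
            · exact Or.inr ⟨e', he', hp⟩
        · rw [if_neg hss]
          constructor
          · rintro (h | ⟨e', he', hp⟩)
            · exact Or.inl h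
            · exact Or.inr ⟨e', Or.inr he', hp⟩
          · rintro (h | ⟨e', he' | he', hp⟩)
            · exact Or.inl h
            · subst he'; obtain ⟨h1, h2, h3⟩ := hp
              rw [hsrc] at h1; injection h1 with h1; exact absurd rfl (h1 ▸ hss)
            · exact Or.inr ⟨e', he', hp⟩

theorem pvLookup_in_mem (edges : List (List (String × String))) (u x : Option String) :
    x ∈ pvLookup (pvBuildIn edges) u ↔
      ∃ e ∈ edges, pvGet e "target" = u ∧ pvTruthy u = true ∧ pvGet e "source" = x := by
  cases u with
  | none => simp [pvLookup, pvTruthy]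
  | some s =>
    show x ∈ (pvBuildIn edges).getD s [] ↔ _
    rw [pvBuildIn, pvBuildIn_aux]
    simp [pvTruthy, PySem.Dict.getD_empty]

theorem pvRoundA_inner_mem (L : List (Option String))
    (st : PySem.Set (Option String) × PySem.Set (Option String)) (x : Option String) :
    (x ∈ (L.foldl (fun st nb => if PySem.Set.contains st.2 nb then st
            else (PySem.Set.add st.1 nb, PySem.Set.add st.2 nb)) st).2 ↔ x ∈ st.2 ∨ x ∈ L) ∧
    (x ∈ (L.foldl (fun st nb => if PySem.Set.contains st.2 nb then st
            else (PySem.Set.add st.1 nb, PySem.Set.add st.2 nb)) st).1 ↔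
        x ∈ st.1 ∨ (x ∈ L ∧ x ∉ st.2)) := by
  induction L generalizing st with
  | nil => simp
  | cons nb L ih =>
    simp only [List.foldl_cons]
    by_cases hmem : nb ∈ st.2
    · rw [if_pos (by simpa [PySem.Set.contains_iff] using hmem)]
      obtain ⟨ih2, ih1⟩ := ih st
      refine ⟨?_, ?_⟩
      · rw [ih2]; simp only [List.mem_cons]
        constructor
        · tauto
        · rintro (h | h | h)
          · tauto
          · subst h; tauto
          · tauto
      · rw [ih1]; simp only [List.mem_cons]
        constructor
        · tauto
        · rintro (h | ⟨h1 | h1, h2⟩)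
          · tauto
          · subst h1; tauto
          · tauto
    · rw [if_neg (by simpa [PySem.Set.contains_iff] using hmem)]
      obtain ⟨ih2, ih1⟩ := ih (PySem.Set.add st.1 nb, PySem.Set.add st.2 nb)
      refine ⟨?_, ?_⟩
      · rw [ih2]; simp only [List.mem_cons, PySem.Set.mem_add]
        tauto
      · rw [ih1]; simp only [List.mem_cons, PySem.Set.mem_add]
        constructor
        · rintro ((h | h) | ⟨h1, h2⟩)
          · tauto
          · subst h; tauto
          · tauto
        · rintro (h | ⟨h1 | h1, h2⟩)
          · tauto
          · subst h1; tauto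
          · by_cases hx : x = nb
            · subst hx; tauto
            · right; exact ⟨h1, by simp [PySem.Set.mem_add, h2, hx]⟩

theorem pvRoundA_step_mem (outg inc : PySem.Dict String (List (Option String)))
    (st : PySem.Set (Option String) × PySem.Set (Option String)) (u x : Option String) :
    (x ∈ (pvRoundA outg inc st u).2 ↔
        x ∈ st.2 ∨ x ∈ pvLookup outg u ++ pvLookup inc u) ∧
    (x ∈ (pvRoundA outg inc st u).1 ↔
        x ∈ st.1 ∨ (x ∈ pvLookup outg u ++ pvLookup inc u ∧ x ∉ st.2)) := by
  simp only [pvRoundA]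
  obtain ⟨h12, h11⟩ := pvRoundA_inner_mem (pvLookup outg u) st x
  obtain ⟨h22, h21⟩ := pvRoundA_inner_mem (pvLookup inc u)
    ((pvLookup outg u).foldl (fun st nb => if PySem.Set.contains st.2 nb then st
      else (PySem.Set.add st.1 nb, PySem.Set.add st.2 nb)) st) x
  simp only [List.mem_append]
  rw [h22, h21, h12, h11]
  constructor
  · exact or_assoc
  · constructor
    · rintro ((h | ⟨h1, h2⟩) | ⟨h1, h2⟩)
      · exact Or.inl h
      · exact Or.inr ⟨Or.inl h1, h2⟩
      · right; exact ⟨Or.inr h1, fun hc => h2 (Or.inl hc)⟩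
    · rintro (h | ⟨h1 | h1, h2⟩)
      · exact Or.inl (Or.inl h)
      · exact Or.inl (Or.inr ⟨h1, h2⟩)
      · by_cases hx : x ∈ pvLookup outg u
        · exact Or.inl (Or.inr ⟨hx, h2⟩)
        · right; exact ⟨h1, fun hc => hc.elim h2 hx⟩

theorem pvRoundA_fold_mem (outg inc : PySem.Dict String (List (Option String)))
    (F : List (Option String))
    (st : PySem.Set (Option String) × PySem.Set (Option String)) (x : Option String) :
    (x ∈ (F.foldl (pvRoundA outg inc) st).2 ↔
        x ∈ st.2 ∨ ∃ u ∈ F, x ∈ pvLookup outg u ++ pvLookup inc u) ∧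
    (x ∈ (F.foldl (pvRoundA outg inc) st).1 ↔
        x ∈ st.1 ∨ ((∃ u ∈ F, x ∈ pvLookup outg u ++ pvLookup inc u) ∧ x ∉ st.2)) := by
  induction F generalizing st with
  | nil => simp
  | cons u F ih =>
    simp only [List.foldl_cons]
    obtain ⟨ih2, ih1⟩ := ih (pvRoundA outg inc st u)
    obtain ⟨s2, s1⟩ := pvRoundA_step_mem outg inc st u x
    refine ⟨?_, ?_⟩
    · rw [ih2, s2]
      constructor
      · rintro ((h | h) | ⟨u', hu', hp⟩)
        · exact Or.inl h
        · exact Or.inr ⟨u, List.mem_cons_self, h⟩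
        · exact Or.inr ⟨u', List.mem_cons_of_mem _ hu', hp⟩
      · rintro (h | ⟨u', hu', hp⟩)
        · exact Or.inl (Or.inl h)
        · rcases List.mem_cons.mp hu' with h' | h'
          · subst h'; exact Or.inl (Or.inr hp)
          · exact Or.inr ⟨u', h', hp⟩
    · rw [ih1, s1, s2]
      constructor
      · rintro ((h | ⟨h1, h2⟩) | ⟨⟨u', hu', hp⟩, h2⟩)
        · exact Or.inl h
        · exact Or.inr ⟨⟨u, List.mem_cons_self, h1⟩, h2⟩
        · exact Or.inr ⟨⟨u', List.mem_cons_of_mem _ hu', hp⟩, fun hc => h2 (Or.inl hc)⟩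
      · rintro (h | ⟨⟨u', hu', hp⟩, h2⟩)
        · exact Or.inl (Or.inl h)
        · rcases List.mem_cons.mp hu' with h' | h'
          · subst h'; exact Or.inl (Or.inr ⟨hp, h2⟩)
          · by_cases hx : x ∈ pvLookup outg u ++ pvLookup inc u
            · exact Or.inl (Or.inr ⟨hx, h2⟩)
            · exact Or.inr ⟨⟨u', h', hp⟩, fun hc => hc.elim h2 hx⟩

theorem pvNbrs_iff (edges : List (List (String × String))) (u x : Option String) :
    x ∈ pvLookup (pvBuildOut edges) u ++ pvLookup (pvBuildIn edges) u ↔ pvNbr edges u x := by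
  rw [List.mem_append, pvLookup_out_mem, pvLookup_in_mem, pvNbr]
  constructor
  · rintro (⟨e, he, hp⟩ | ⟨e, he, hp⟩)
    · exact ⟨e, he, Or.inl hp⟩
    · exact ⟨e, he, Or.inr hp⟩
  · rintro ⟨e, he, hp | hp⟩
    · exact Or.inl ⟨e, he, hp⟩
    · exact Or.inr ⟨e, he, hp⟩

theorem pvSet_prefix_add (S : PySem.Set (Option String)) (x : Option String) :
    S <+: PySem.Set.add S x := by
  rw [PySem.Set.add_eq_ite]
  split
  · exact List.prefix_refl S
  · exact List.prefix_append S [x]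

theorem pvGrowB_prefix (edges : List (List (String × String))) (S : PySem.Set (Option String)) :
    S <+: pvGrowB S edges := by
  suffices h : ∀ g0 : PySem.Set (Option String), g0 <+: edges.foldl (fun grown e =>
      let s := pvGet e "source"
      let t := pvGet e "target"
      let grown := if pvTruthy s && PySem.Set.contains S s then PySem.Set.add grown t else grown
      if pvTruthy t && PySem.Set.contains S t then PySem.Set.add grown s else grown) g0 by
    exact h S
  induction edges with
  | nil => intro g0; exact List.prefix_refl g0
  | cons e es ih =>
    intro g0
    simp only [List.foldl_cons]
    refine List.IsPrefix.trans ?_ (ih _)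
    by_cases hs : pvTruthy (pvGet e "source") && PySem.Set.contains S (pvGet e "source") <;>
      by_cases ht : pvTruthy (pvGet e "target") && PySem.Set.contains S (pvGet e "target") <;>
      simp only [hs, ht, Bool.false_eq_true, if_false, if_true, reduceIte]
    · exact List.IsPrefix.trans (pvSet_prefix_add _ _) (pvSet_prefix_add _ _)
    · exact pvSet_prefix_add _ _
    · exact pvSet_prefix_add _ _
    · exact List.prefix_refl _

theorem pvGrowB_nodup (edges : List (List (String × String))) (S : PySem.Set (Option String))
    (h : S.Nodup) : (pvGrowB S edges).Nodup := by
  suffices hh : ∀ g0 : PySem.Set (Option String), g0.Nodup → (edges.foldl (fun grown e =>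
      let s := pvGet e "source"
      let t := pvGet e "target"
      let grown := if pvTruthy s && PySem.Set.contains S s then PySem.Set.add grown t else grown
      if pvTruthy t && PySem.Set.contains S t then PySem.Set.add grown s else grown) g0).Nodup by
    exact hh S h
  induction edges with
  | nil => exact fun g0 h0 => h0
  | cons e es ih =>
    intro g0 h0
    simp only [List.foldl_cons]
    refine ih _ ?_
    by_cases hs : pvTruthy (pvGet e "source") && PySem.Set.contains S (pvGet e "source") <;>
      by_cases ht : pvTruthy (pvGet e "target") && PySem.Set.contains S (pvGet e "target") <;>
      simp only [hs, ht, Bool.false_eq_true, if_false, if_true, reduceIte]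
    · exact PySem.Set.nodup_add _ _ (PySem.Set.nodup_add _ _ h0)
    · exact PySem.Set.nodup_add _ _ h0
    · exact PySem.Set.nodup_add _ _ h0
    · exact h0

theorem pvGrowB_mem (edges : List (List (String × String)))
    (S : PySem.Set (Option String)) (x : Option String) :
    x ∈ pvGrowB S edges ↔ x ∈ S ∨ ∃ u ∈ S, pvNbr edges u x := by
  suffices h : ∀ g0 : PySem.Set (Option String), (x ∈ edges.foldl (fun grown e =>
      let s := pvGet e "source"
      let t := pvGet e "target"
      let grown := if pvTruthy s && PySem.Set.contains S s then PySem.Set.add grown t else grown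
      if pvTruthy t && PySem.Set.contains S t then PySem.Set.add grown s else grown) g0 ↔
      x ∈ g0 ∨ ∃ e ∈ edges,
        (pvTruthy (pvGet e "source") = true ∧ pvGet e "source" ∈ S ∧ x = pvGet e "target") ∨
        (pvTruthy (pvGet e "target") = true ∧ pvGet e "target" ∈ S ∧ x = pvGet e "source")) by
    rw [pvGrowB, h S]
    constructor
    · rintro (h0 | ⟨e, he, ⟨h1, h2, h3⟩ | ⟨h1, h2, h3⟩⟩)
      · exact Or.inl h0
      · exact Or.inr ⟨pvGet e "source", h2, e, he, Or.inl ⟨rfl, h1, h3.symm⟩⟩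
      · exact Or.inr ⟨pvGet e "target", h2, e, he, Or.inr ⟨rfl, h1, h3.symm⟩⟩
    · rintro (h0 | ⟨u, hu, e, he, ⟨h1, h2, h3⟩ | ⟨h1, h2, h3⟩⟩)
      · exact Or.inl h0
      · exact Or.inr ⟨e, he, Or.inl ⟨by rw [h1]; exact h2, by rw [h1]; exact hu, h3.symm⟩⟩
      · exact Or.inr ⟨e, he, Or.inr ⟨by rw [h1]; exact h2, by rw [h1]; exact hu, h3.symm⟩⟩
  induction edges with
  | nil => simp
  | cons e es ih =>
    intro g0
    simp only [List.foldl_cons]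
    rw [ih _]
    by_cases hs : pvTruthy (pvGet e "source") && PySem.Set.contains S (pvGet e "source")
    · by_cases ht : pvTruthy (pvGet e "target") && PySem.Set.contains S (pvGet e "target")
      · simp only [hs, ht, Bool.false_eq_true, if_false, if_true, reduceIte, PySem.Set.mem_add, List.mem_cons]
        simp only [Bool.and_eq_true, PySem.Set.contains_iff] at hs ht
        constructor
        · rintro (((h0 | h0) | h0) | ⟨e', he', hp⟩)
          · exact Or.inl h0
          · exact Or.inr ⟨e, Or.inl rfl, Or.inl ⟨hs.1, hs.2, h0⟩⟩
          · exact Or.inr ⟨e, Or.inl rfl, Or.inr ⟨ht.1, ht.2, h0⟩⟩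
          · exact Or.inr ⟨e', Or.inr he', hp⟩
        · rintro (h0 | ⟨e', he' | he', hp⟩)
          · exact Or.inl (Or.inl (Or.inl h0))
          · subst he'; rcases hp with ⟨h1, h2, h3⟩ | ⟨h1, h2, h3⟩
            · exact Or.inl (Or.inl (Or.inr h3))
            · exact Or.inl (Or.inr h3)
          · exact Or.inr ⟨e', he', hp⟩
      · simp only [hs, ht, Bool.false_eq_true, if_false, if_true, reduceIte, PySem.Set.mem_add, List.mem_cons]
        simp only [Bool.and_eq_true, PySem.Set.contains_iff] at hs
        simp only [Bool.and_eq_true, PySem.Set.contains_iff] at ht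
        constructor
        · rintro ((h0 | h0) | ⟨e', he', hp⟩)
          · exact Or.inl h0
          · exact Or.inr ⟨e, Or.inl rfl, Or.inl ⟨hs.1, hs.2, h0⟩⟩
          · exact Or.inr ⟨e', Or.inr he', hp⟩
        · rintro (h0 | ⟨e', he' | he', hp⟩)
          · exact Or.inl (Or.inl h0)
          · subst he'; rcases hp with ⟨h1, h2, h3⟩ | ⟨h1, h2, h3⟩
            · exact Or.inl (Or.inr h3)
            · exact absurd ⟨h1, h2⟩ ht
          · exact Or.inr ⟨e', he', hp⟩
    · by_cases ht : pvTruthy (pvGet e "target") && PySem.Set.contains S (pvGet e "target")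
      · simp only [hs, ht, Bool.false_eq_true, if_false, if_true, reduceIte, PySem.Set.mem_add, List.mem_cons]
        simp only [Bool.and_eq_true, PySem.Set.contains_iff] at hs
        simp only [Bool.and_eq_true, PySem.Set.contains_iff] at ht
        constructor
        · rintro ((h0 | h0) | ⟨e', he', hp⟩)
          · exact Or.inl h0
          · exact Or.inr ⟨e, Or.inl rfl, Or.inr ⟨ht.1, ht.2, h0⟩⟩
          · exact Or.inr ⟨e', Or.inr he', hp⟩
        · rintro (h0 | ⟨e', he' | he', hp⟩)
          · exact Or.inl (Or.inl h0)
          · subst he'; rcases hp with ⟨h1, h2, h3⟩ | ⟨h1, h2, h3⟩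
            · exact absurd ⟨h1, h2⟩ hs
            · exact Or.inl (Or.inr h3)
          · exact Or.inr ⟨e', he', hp⟩
      · simp only [hs, ht, Bool.false_eq_true, if_false, if_true, reduceIte, List.mem_cons]
        simp only [Bool.and_eq_true, PySem.Set.contains_iff] at hs
        simp only [Bool.and_eq_true, PySem.Set.contains_iff] at ht
        constructor
        · rintro (h0 | ⟨e', he', hp⟩)
          · exact Or.inl h0
          · exact Or.inr ⟨e', Or.inr he', hp⟩
        · rintro (h0 | ⟨e', he' | he', hp⟩)
          · exact Or.inl h0
          · subst he'; rcases hp with ⟨h1, h2, h3⟩ | ⟨h1, h2, h3⟩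
            · exact absurd ⟨h1, h2⟩ hs
            · exact absurd ⟨h1, h2⟩ ht
          · exact Or.inr ⟨e', he', hp⟩

theorem pvLoop_sync (edges : List (List (String × String))) (k : Nat)
    (S incl F : PySem.Set (Option String))
    (hS : S.Nodup)
    (hmem : ∀ x, x ∈ incl ↔ x ∈ S)
    (hF : ∀ x ∈ F, x ∈ incl)
    (hcl : ∀ u x, u ∈ incl → u ∉ F → pvNbr edges u x → x ∈ incl) :
    ∀ x, x ∈ pvBfsA (pvBuildOut edges) (pvBuildIn edges) k incl F ↔ x ∈ pvSatB edges k S := by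
  induction k generalizing S incl F with
  | zero => intro x; simpa [pvBfsA, pvSatB] using hmem x
  | succ k ih =>
    intro x
    simp only [pvBfsA, pvSatB]
    have hst2 : ∀ y, y ∈ (F.foldl (pvRoundA (pvBuildOut edges) (pvBuildIn edges))
        (PySem.Set.empty, incl)).2 ↔ y ∈ incl ∨ ∃ u ∈ F, pvNbr edges u y := by
      intro y
      rw [(pvRoundA_fold_mem (pvBuildOut edges) (pvBuildIn edges) F (PySem.Set.empty, incl) y).1]
      exact or_congr_right (exists_congr fun u => and_congr_right fun _ => pvNbrs_iff edges u y)
    have hst1 : ∀ y, y ∈ (F.foldl (pvRoundA (pvBuildOut edges) (pvBuildIn edges))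
        (PySem.Set.empty, incl)).1 ↔ (∃ u ∈ F, pvNbr edges u y) ∧ y ∉ incl := by
      intro y
      rw [(pvRoundA_fold_mem (pvBuildOut edges) (pvBuildIn edges) F (PySem.Set.empty, incl) y).2]
      have : y ∉ (PySem.Set.empty : PySem.Set (Option String)) := by simp [PySem.Set.empty]
      simp only [PySem.Set.empty, List.not_mem_nil, false_or]
      exact and_congr_left fun _ => exists_congr fun u => and_congr_right fun _ => pvNbrs_iff edges u y
    have hgrown := pvGrowB_mem edges S
    have hpre := pvGrowB_prefix edges S
    have hnd := pvGrowB_nodup edges S hS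
    -- length equality at B's test ↔ the round added nothing
    have hlen_iff : (pvGrowB S edges).length = S.length ↔
        (∀ y, y ∈ pvGrowB S edges ↔ y ∈ S) := by
      constructor
      · intro hlen y
        conv_lhs => rw [← List.IsPrefix.eq_of_length hpre hlen.symm]
      · intro hmm
        obtain ⟨t, ht⟩ := hpre
        cases t with
        | nil => rw [← ht]; simp
        | cons c t' =>
          exfalso
          have hcg : c ∈ pvGrowB S edges := by
            rw [← ht]; exact List.mem_append_right _ List.mem_cons_self
          have hcS : c ∈ S := (hmm c).mp hcg
          have : ¬ c ∈ S := by
            have := hnd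
            rw [← ht] at this
            exact fun hc => (List.disjoint_of_nodup_append this) hc List.mem_cons_self
          exact this hcS
    -- A's frontier-emptiness test ↔ the same saturation condition
    have hempty_iff : ((F.foldl (pvRoundA (pvBuildOut edges) (pvBuildIn edges))
        (PySem.Set.empty, incl)).1.isEmpty = true) ↔
        (∀ y, (∃ u ∈ F, pvNbr edges u y) → y ∈ incl) := by
      rw [List.isEmpty_iff, List.eq_nil_iff_forall_not_mem]
      constructor
      · intro h y hy
        by_contra hni
        exact h y ((hst1 y).mpr ⟨hy, hni⟩)
      · intro h y hy
        obtain ⟨h1, h2⟩ := (hst1 y).mp hy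
        exact h2 (h y h1)
    have hsat_iff : (∀ y, (∃ u ∈ F, pvNbr edges u y) → y ∈ incl) ↔
        (∀ y, y ∈ pvGrowB S edges ↔ y ∈ S) := by
      constructor
      · intro h y
        rw [hgrown y]
        constructor
        · rintro (hy | ⟨u, hu, hn⟩)
          · exact hy
          · have huI : u ∈ incl := (hmem u).mpr hu
            by_cases huF : u ∈ F
            · exact (hmem y).mp (h y ⟨u, huF, hn⟩)
            · exact (hmem y).mp (hcl u y huI huF hn)
        · exact Or.inl
      · intro h y ⟨u, hu, hn⟩
        have huS : u ∈ S := (hmem u).mp (hF u hu)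
        exact (hmem y).mpr ((h y).mp ((hgrown y).mpr (Or.inr ⟨u, huS, hn⟩)))
    by_cases hc : (F.foldl (pvRoundA (pvBuildOut edges) (pvBuildIn edges))
        (PySem.Set.empty, incl)).1.isEmpty = true
    · rw [if_pos hc, if_pos (hlen_iff.mpr (hsat_iff.mp (hempty_iff.mp hc)))]
      have hNF := hempty_iff.mp hc
      rw [hst2 x]
      constructor
      · rintro (h | h)
        · exact (hmem x).mp h
        · exact (hmem x).mp (hNF x h)
      · intro h
        exact Or.inl ((hmem x).mpr h)
    · have hlen : ¬ (pvGrowB S edges).length = S.length := by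
        intro h
        exact hc (hempty_iff.mpr (hsat_iff.mpr (hlen_iff.mp h)))
      rw [if_neg hc, if_neg hlen]
      refine ih (pvGrowB S edges) _ _ hnd ?_ ?_ ?_ x
      · -- new included ≡ new S
        intro y
        rw [hst2 y, hgrown y]
        constructor
        · rintro (h | ⟨u, hu, hn⟩)
          · exact Or.inl ((hmem y).mp h)
          · exact Or.inr ⟨u, (hmem u).mp (hF u hu), hn⟩
        · rintro (h | ⟨u, hu, hn⟩)
          · exact Or.inl ((hmem y).mpr h)
          · have huI : u ∈ incl := (hmem u).mpr hu
            by_cases huF : u ∈ F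
            · exact Or.inr ⟨u, huF, hn⟩
            · exact Or.inl (hcl u y huI huF hn)
      · -- new frontier ⊆ new included
        intro y hy
        obtain ⟨h1, -⟩ := (hst1 y).mp hy
        exact (hst2 y).mpr (Or.inr h1)
      · -- closure outside the new frontier
        intro u y hu hnF hn
        rcases (hst2 u).mp hu with huI | huNF
        · by_cases huF : u ∈ F
          · exact (hst2 y).mpr (Or.inr ⟨u, huF, hn⟩)
          · exact (hst2 y).mpr (Or.inl (hcl u y huI huF hn))
        · by_cases huI : u ∈ incl
          · by_cases huF : u ∈ F
            · exact (hst2 y).mpr (Or.inr ⟨u, huF, hn⟩)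
            · exact (hst2 y).mpr (Or.inl (hcl u y huI huF hn))
          · exact absurd ((hst1 u).mpr ⟨huNF, huI⟩) hnF

theorem extract_subgraph_eq (nodes edges : List (List (String × String)))
    (c : String) (depth : Int) :
    extract_subgraph nodes edges c depth = extract_subgraph_alt nodes edges c depth := by
  simp only [extract_subgraph, extract_subgraph_alt]
  have hd : (if depth < 1 then 1 else depth) = max depth 1 := by
    by_cases h : depth < 1
    · rw [if_pos h, max_eq_right (by omega)]
    · rw [if_neg h, max_eq_left (by omega)]
  rw [hd]
  have hsync := pvLoop_sync edges (max depth 1).toNat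
      (PySem.Set.ofList [some c]) (PySem.Set.ofList [some c]) (PySem.Set.ofList [some c])
      (PySem.Set.nodup_ofList _) (fun _ => Iff.rfl) (fun _ h => h)
      (fun u x hu hnu _ => absurd hu hnu)
  have hcont : ∀ v, PySem.Set.contains
      (pvBfsA (pvBuildOut edges) (pvBuildIn edges) (max depth 1).toNat
        (PySem.Set.ofList [some c]) (PySem.Set.ofList [some c])) v =
      PySem.Set.contains (pvSatB edges (max depth 1).toNat (PySem.Set.ofList [some c])) v := by
    intro v
    rcases hb : PySem.Set.contains (pvSatB edges (max depth 1).toNat (PySem.Set.ofList [some c])) v with _ | _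
    · rw [← Bool.not_eq_true] at hb ⊢
      rw [PySem.Set.contains_iff] at hb ⊢
      exact fun hmm => hb ((hsync v).mp hmm)
    · rw [PySem.Set.contains_iff] at hb ⊢
      exact (hsync v).mpr hb
  rw [Prod.mk.injEq]
  constructor
  · exact List.filter_congr fun a _ => by rw [hcont]
  · exact List.filter_congr fun a _ => by rw [hcont, hcont]

-- ===== VERDICT (by name: the statement is the Claim_ definition above) =====
theorem extract_subgraph_spec : Claim_equal_extract_subgraph := by
  intro nodes edges center_node_id depth _
  unfold Spec_extract_subgraph
  exact extract_subgraph_eq nodes edges center_node_id depth
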